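-- pv_equiv track=rewrite | github.com/castle6902/cursor | common/utils/sheet_utils.py | rename_empty_headers_with_left
-- ===== SOURCE A (Python) =====
-- def rename_empty_headers_with_left(headerStr: str, separator: str = ',', new_header_prefix: str = "COLUMN_"):
--     """
--     A, , , ,B, ,C, D,
--     A, A_1, A_2, A_3,B, B_1,C, D,
--
--     参数:
--         index: 从0开始的索引值
--
--     返回:
--         对应的Excel风格列名字符串
--     """
--     """
--     处理表头字符串，将空表头重命名为 COLUMN_数字（从1开始）
--
--     参数:
--         headerStr: 原始表头字符串（如 "ALT,TP,,GLU"）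
--         separator: 分隔符，默认为逗号 ','，可根据实际情况修改（如 '\t' 表示制表符）
--
--     返回:
--         处理后的表头列表
--     """
--     header_list = headerStr.split(separator)
--     # 记录空表头的计数（从1开始，避免 COLUMN_0）
--
--     #
--     start_header = "start"
--     index = 1
--
--     for i in range(len(header_list)):
--         header = header_list[i].strip()
--         if header:
--             start_header = header
--             index = 1
--         else:
--             header_list[i] = f"{start_header}_{index}"
--             index = index + 1
--
--     return f'{separator}'.join(map(str, header_list))
-- ===== SOURCE B (Python) =====
-- from itertools import groupby
--
-- def rename_empty_headers_with_left(headerStr: str, separator: str = ',', new_header_prefix: str = "COLUMN_"):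
--     cells = headerStr.split(separator)
--     out = []
--     base = "start"
--     for nonempty, run in groupby(cells, key=lambda c: bool(c.strip())):
--         run = list(run)
--         if nonempty:
--             out.extend(run)
--             base = run[-1].strip()
--         else:
--             out.extend(f"{base}_{i}" for i, _ in enumerate(run, 1))
--     return separator.join(map(str, out))
-- ===== Notes on version B (the rewrite author's own statement) =====
-- stated objective: alternative
-- what changed: B replaces A's per-cell reset-counter state machine with a run-based decomposition (itertools.groupby on emptiness of the stripped cell): non-empty runs pass through and set the base to the last cell's stripped value, empty runs are renamed by enumerating the run from 1.
import Mathlib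
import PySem

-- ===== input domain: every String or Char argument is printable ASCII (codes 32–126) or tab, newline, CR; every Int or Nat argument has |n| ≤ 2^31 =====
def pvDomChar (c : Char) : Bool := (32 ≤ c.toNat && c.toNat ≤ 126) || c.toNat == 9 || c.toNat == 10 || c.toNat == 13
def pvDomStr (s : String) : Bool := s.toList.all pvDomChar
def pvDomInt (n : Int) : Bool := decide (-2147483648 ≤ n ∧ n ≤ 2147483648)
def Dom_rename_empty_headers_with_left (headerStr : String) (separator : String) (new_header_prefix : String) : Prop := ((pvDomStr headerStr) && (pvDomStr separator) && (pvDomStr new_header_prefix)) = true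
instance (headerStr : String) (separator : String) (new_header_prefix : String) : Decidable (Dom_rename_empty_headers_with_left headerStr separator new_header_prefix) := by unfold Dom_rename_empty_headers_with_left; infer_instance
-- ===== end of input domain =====

-- B renames empty headers by walking maximal runs of empty/non-empty cells instead of
-- A's per-cell reset-counter state machine; objective: alternative decomposition, same cost.

-- ===== PORT A =====
-- the for-loop over range(len(header_list)) mutating header_list[i], carried state (start_header, index)
def pvLoopA : List String → String → Int → List String
  | [], _, _ => []
  | h :: t, start, idx =>
    if PySem.Str.strip h != "" then
      h :: pvLoopA t (PySem.Str.strip h) 1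
    else
      (start ++ "_" ++ PySem.Int.toStr idx) :: pvLoopA t start (idx + 1)

def rename_empty_headers_with_left (headerStr : String) (separator : String) (new_header_prefix : String) : String :=
  match PySem.Str.split? headerStr separator with
  | none => ""   -- empty separator: Python raises ValueError; excluded by Pre_
  | some header_list => PySem.Str.join separator (pvLoopA header_list "start" 1)

-- ===== PORT B =====
-- groupby(cells, key = cell.strip() non-empty): non-empty runs pass through and update the
-- base to the last cell's stripped value; empty runs become base_1, base_2, … .
def pvNonempty (c : String) : Bool := PySem.Str.strip c != ""

def pvLoopB : String → List String → List String
  | _, [] => []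
  | base, h :: t =>
    if pvNonempty h then
      let run := (h :: t).takeWhile pvNonempty
      run ++ pvLoopB (PySem.Str.strip (run.getLast?.getD h)) ((h :: t).dropWhile pvNonempty)
    else
      let run := (h :: t).takeWhile (fun c => !pvNonempty c)
      (List.range run.length).map (fun (j : Nat) => base ++ "_" ++ PySem.Int.toStr (1 + (j : Int)))
        ++ pvLoopB base ((h :: t).dropWhile (fun c => !pvNonempty c))
termination_by _ l => l.length
decreasing_by
  all_goals
    simp only [List.dropWhile_cons]
    split <;>
      first
        | exact List.length_dropWhile_le _ _
        | exact Nat.lt_succ_of_le (List.length_dropWhile_le _ _)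
        | simp_all

def rename_empty_headers_with_left_alt (headerStr : String) (separator : String) (new_header_prefix : String) : String :=
  match PySem.Str.split? headerStr separator with
  | none => ""
  | some cells => PySem.Str.join separator (pvLoopB "start" cells)

-- ===== PRECONDITION & SPEC =====
-- Pre_ excludes an empty separator, on which Python str.split raises ValueError in both A and B.
def Pre_rename_empty_headers_with_left (headerStr : String) (separator : String) (new_header_prefix : String) : Prop := separator ≠ ""
instance (headerStr : String) (separator : String) (new_header_prefix : String) : Decidable (Pre_rename_empty_headers_with_left headerStr separator new_header_prefix) := by unfold Pre_rename_empty_headers_with_left; infer_instance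

def pvWitness_rename_empty_headers_with_left : String × String × String := ("A, , , ,B, ,C, D,", ",", "COLUMN_")

def Spec_rename_empty_headers_with_left (headerStr : String) (separator : String) (new_header_prefix : String) (out : String) : Prop := out = rename_empty_headers_with_left_alt headerStr separator new_header_prefix
instance (headerStr : String) (separator : String) (new_header_prefix : String) (out : String) : Decidable (Spec_rename_empty_headers_with_left headerStr separator new_header_prefix out) := by unfold Spec_rename_empty_headers_with_left; infer_instance

-- ===== CLAIM (what is proved, stated in full; the proofs are below) =====
def Claim_equal_rename_empty_headers_with_left : Prop := ∀ (headerStr : String) (separator : String) (new_header_prefix : String), Dom_rename_empty_headers_with_left headerStr separator new_header_prefix → Pre_rename_empty_headers_with_left headerStr separator new_header_prefix → Spec_rename_empty_headers_with_left headerStr separator new_header_prefix (rename_empty_headers_with_left headerStr separator new_header_prefix)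

-- ===== LEMMAS AND PROOFS =====

-- A on a run of non-empty cells: each passes through; the base ends at the last cell's strip.
lemma pvA_skip_nonempty (run : List String) :
    ∀ rest base, (∀ c ∈ run, pvNonempty c = true) →
    pvLoopA (run ++ rest) base 1
      = run ++ pvLoopA rest (match run.getLast? with
          | some c => PySem.Str.strip c
          | none => base) 1 := by
  induction run with
  | nil => intro rest base h; simp
  | cons c t ih =>
      intro rest base h
      have hc : pvNonempty c = true := h c (List.mem_cons_self ..)
      simp only [List.cons_append, pvLoopA, pvNonempty] at hc ⊢
      rw [hc]
      simp only [if_true]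
      rw [ih rest (PySem.Str.strip c) (fun x hx => h x (List.mem_cons_of_mem _ hx))]
      cases t with
      | nil => simp
      | cons d u =>
          obtain ⟨x, hx⟩ := Option.isSome_iff_exists.mp
            ((List.getLast?_isSome).mpr (by simp) : ((d :: u).getLast?).isSome = true)
          simp [hx]

-- A on a run of empty cells: labels base_i, base_(i+1), …, carrying the counter.
lemma pvA_skip_empty (run : List String) :
    ∀ rest base (i : Int), (∀ c ∈ run, pvNonempty c = false) →
    pvLoopA (run ++ rest) base i
      = (List.range run.length).map (fun (j : Nat) => base ++ "_" ++ PySem.Int.toStr (i + (j : Int)))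
        ++ pvLoopA rest base (i + run.length) := by
  induction run with
  | nil => intro rest base i h; simp
  | cons c t ih =>
      intro rest base i h
      have hc : pvNonempty c = false := h c (List.mem_cons_self ..)
      simp only [List.cons_append, pvLoopA, pvNonempty] at hc ⊢
      rw [hc]
      simp only [Bool.false_eq_true, if_false]
      rw [ih rest base (i + 1) (fun x hx => h x (List.mem_cons_of_mem _ hx))]
      rw [List.length_cons, List.range_succ_eq_map, List.map_cons, List.map_map,
        List.cons_append]
      congr 1
      · congr 2
        simp
      · congr 1
        · refine List.map_congr_left (fun j _ => ?_)
          simp only [Function.comp_apply]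
          congr 2
          push_cast
          ring
        · congr 1
          push_cast
          ring

-- A's counter is irrelevant when the list is empty or starts with a non-empty cell.
lemma pvA_idx_irrelevant (rest : List String) (base : String) (i : Int)
    (h : rest = [] ∨ ∃ x xs, rest = x :: xs ∧ pvNonempty x = true) :
    pvLoopA rest base i = pvLoopA rest base 1 := by
  rcases h with rfl | ⟨x, xs, rfl, hx⟩
  · rfl
  · unfold pvNonempty at hx
    simp only [pvLoopA, hx, if_true]

lemma pvMain (n : Nat) : ∀ (l : List String), l.length ≤ n → ∀ base,
    pvLoopA l base 1 = pvLoopB base l := by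
  induction n with
  | zero =>
      intro l hl base
      cases l with
      | nil => simp [pvLoopA, pvLoopB]
      | cons h t => simp at hl
  | succ n ih =>
      intro l hl base
      cases l with
      | nil => simp [pvLoopA, pvLoopB]
      | cons h t =>
          by_cases hp : pvNonempty h = true
          · have hsplit : (h :: t).takeWhile pvNonempty ++ (h :: t).dropWhile pvNonempty
                = h :: t := List.takeWhile_append_dropWhile
            have hall : ∀ c ∈ (h :: t).takeWhile pvNonempty, pvNonempty c = true :=
              fun c hc => List.mem_takeWhile_imp hc
            have hrun : (h :: t).takeWhile pvNonempty = h :: t.takeWhile pvNonempty := by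
              simp [hp]
            have hrest : (h :: t).dropWhile pvNonempty = t.dropWhile pvNonempty := by
              simp [hp]
            have hlen : ((h :: t).dropWhile pvNonempty).length ≤ n := by
              rw [hrest]
              exact le_trans (List.length_dropWhile_le _ _) (Nat.succ_le_succ_iff.mp hl)
            obtain ⟨x, hx⟩ := Option.isSome_iff_exists.mp
              ((List.getLast?_isSome).mpr (by rw [hrun]; simp)
                : (((h :: t).takeWhile pvNonempty).getLast?).isSome = true)
            conv_lhs => rw [← hsplit]
            rw [pvA_skip_nonempty _ _ base hall, hx]
            rw [ih _ hlen]
            conv_rhs => rw [pvLoopB]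
            simp only [hp, if_true, hx, Option.getD_some]
          · have hsplit : (h :: t).takeWhile (fun c => !pvNonempty c)
                ++ (h :: t).dropWhile (fun c => !pvNonempty c) = h :: t :=
              List.takeWhile_append_dropWhile
            have hall : ∀ c ∈ (h :: t).takeWhile (fun c => !pvNonempty c),
                pvNonempty c = false := by
              intro c hc
              have := List.mem_takeWhile_imp hc
              simpa using this
            have hrest : (h :: t).dropWhile (fun c => !pvNonempty c)
                = t.dropWhile (fun c => !pvNonempty c) := by
              simp [hp]
            have hlen : ((h :: t).dropWhile (fun c => !pvNonempty c)).length ≤ n := by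
              rw [hrest]
              exact le_trans (List.length_dropWhile_le _ _) (Nat.succ_le_succ_iff.mp hl)
            have hshape : (h :: t).dropWhile (fun c => !pvNonempty c) = []
                ∨ ∃ x xs, (h :: t).dropWhile (fun c => !pvNonempty c) = x :: xs
                    ∧ pvNonempty x = true := by
              cases e : (h :: t).dropWhile (fun c => !pvNonempty c) with
              | nil => exact Or.inl rfl
              | cons x xs =>
                  refine Or.inr ⟨x, xs, rfl, ?_⟩
                  have hne : (h :: t).dropWhile (fun c => !pvNonempty c) ≠ [] := by
                    rw [e]; exact List.cons_ne_nil _ _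
                  have := List.head_dropWhile_not (fun c => !pvNonempty c) hne
                  simp only [e, List.head_cons] at this
                  simpa using this
            conv_lhs => rw [← hsplit]
            rw [pvA_skip_empty _ _ base 1 hall]
            rw [pvA_idx_irrelevant _ base _ hshape]
            rw [ih _ hlen]
            conv_rhs => rw [pvLoopB]
            simp only [hp, if_false, Bool.false_eq_true]

-- ===== VERDICT (by name: the statement is the Claim_ definition above) =====
theorem rename_empty_headers_with_left_spec : Claim_equal_rename_empty_headers_with_left := by
  intro hs sep pfx _ _
  unfold Spec_rename_empty_headers_with_left rename_empty_headers_with_left rename_empty_headers_with_left_alt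
  cases h : PySem.Str.split? hs sep with
  | none => rfl
  | some cells =>
      show PySem.Str.join sep (pvLoopA cells "start" 1) = PySem.Str.join sep (pvLoopB "start" cells)
      exact congrArg _ (pvMain cells.length cells le_rfl "start")
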